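-- pv_equiv track=rewrite | github.com/Nacho077/fiuble | src/game_modes/game.py | proccess_mistakes
-- ===== SOURCE A (Python) =====
-- def proccess_mistakes(mistakes, missing_letters):
--     wrong_place = []
--     wrong_letter = []
--
--     for letter in mistakes:
--         if letter in missing_letters:
--             wrong_place.append(letter)
--             missing_letters.remove(letter)
--         else:
--             wrong_letter.append(letter)
--
--     return wrong_place, wrong_letter
-- ===== SOURCE B (Python) =====
-- def proccess_mistakes(mistakes, missing_letters):
--     # Rank-based classification: the k-th occurrence of a letter belongs to
--     # wrong_place iff k <= that letter's multiplicity in missing_letters.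
--     # (B does not mutate missing_letters; A empties matched letters from it.)
--     need = {}
--     for s in missing_letters:
--         need[s] = need.get(s, 0) + 1
--     rank = []
--     seen = {}
--     for letter in mistakes:
--         seen[letter] = seen.get(letter, 0) + 1
--         rank.append(seen[letter])
--     wrong_place = [l for l, r in zip(mistakes, rank) if r <= need.get(l, 0)]
--     wrong_letter = [l for l, r in zip(mistakes, rank) if r > need.get(l, 0)]
--     return wrong_place, wrong_letter
-- ===== Notes on version B (the rewrite author's own statement) =====
-- stated objective: faster
-- what changed: B drops A's carried partition state (membership test + list.remove on a shrinking list): it precomputes each position's occurrence rank in mistakes and each letter's multiplicity in missing_letters, then builds the two outputs by two independent filters of zip(mistakes, ranks) on the pure predicate rank <= multiplicity; B leaves missing_letters unmutated (return value identical).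
import Mathlib
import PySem

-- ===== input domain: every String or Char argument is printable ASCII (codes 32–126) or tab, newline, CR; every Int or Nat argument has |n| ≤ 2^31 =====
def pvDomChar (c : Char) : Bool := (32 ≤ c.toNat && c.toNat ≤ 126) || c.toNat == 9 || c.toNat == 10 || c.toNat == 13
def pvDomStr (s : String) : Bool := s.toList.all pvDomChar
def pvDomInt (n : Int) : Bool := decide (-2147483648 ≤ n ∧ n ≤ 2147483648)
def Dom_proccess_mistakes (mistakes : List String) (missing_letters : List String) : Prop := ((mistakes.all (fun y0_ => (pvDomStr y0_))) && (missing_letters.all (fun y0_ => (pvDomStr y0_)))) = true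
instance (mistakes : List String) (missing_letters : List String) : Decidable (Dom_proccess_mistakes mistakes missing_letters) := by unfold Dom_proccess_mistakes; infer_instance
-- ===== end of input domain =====

-- B classifies each position by its occurrence rank (rank <= multiplicity in missing_letters)
-- via staged passes and two independent filters instead of A's carried search-and-remove state
-- (faster); equivalence is about the RETURN value only: A empties matched letters out of
-- missing_letters in place, B leaves it unchanged.


-- ===== PORT A =====
-- 'missing_letters.remove(letter)' is reached only when 'letter in missing_letters' holds:
-- PySem.List.remove? is some there; .getD keeps the port total (never taken when none).
def proccess_mistakes (mistakes : List String) (missing_letters : List String) : List String × List String :=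
  let st := mistakes.foldl
    (fun (st : List String × List String × List String) letter =>
      if letter ∈ st.2.2 then
        (st.1 ++ [letter], st.2.1, (PySem.List.remove? st.2.2 letter).getD st.2.2)
      else
        (st.1, st.2.1 ++ [letter], st.2.2))
    ([], [], missing_letters)
  (st.1, st.2.1)

-- ===== PORT B =====
def proccess_mistakes_alt (mistakes : List String) (missing_letters : List String) : List String × List String :=
  let need := missing_letters.foldl
    (fun (d : PySem.Dict String Int) s => d.insert s (d.getD s 0 + 1)) PySem.Dict.empty
  let rk := mistakes.foldl
    (fun (st : List Int × PySem.Dict String Int) letter =>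
      let seen := st.2.insert letter (st.2.getD letter 0 + 1)
      (st.1 ++ [seen.getD letter 0], seen))
    ([], PySem.Dict.empty)
  let wrong_place := ((mistakes.zip rk.1).filter (fun p => decide (p.2 ≤ need.getD p.1 0))).map Prod.fst
  let wrong_letter := ((mistakes.zip rk.1).filter (fun p => decide (p.2 > need.getD p.1 0))).map Prod.fst
  (wrong_place, wrong_letter)

-- ===== PRECONDITION & SPEC =====
def Spec_proccess_mistakes (mistakes : List String) (missing_letters : List String) (out : List String × List String) : Prop := out = proccess_mistakes_alt mistakes missing_letters
instance (mistakes : List String) (missing_letters : List String) (out : List String × List String) : Decidable (Spec_proccess_mistakes mistakes missing_letters out) := by unfold Spec_proccess_mistakes; infer_instance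

-- ===== CLAIM (what is proved, stated in full; the proofs are below) =====
def Claim_equal_proccess_mistakes : Prop := ∀ (mistakes : List String) (missing_letters : List String), Dom_proccess_mistakes mistakes missing_letters → Spec_proccess_mistakes mistakes missing_letters (proccess_mistakes mistakes missing_letters)

-- ===== LEMMAS AND PROOFS =====

-- The sequence of occurrence ranks B's second loop computes, as a structural recursion.
def pvRanksFrom (seen : PySem.Dict String Int) : List String → List Int
  | [] => []
  | letter :: rest =>
      (seen.getD letter 0 + 1) :: pvRanksFrom (seen.insert letter (seen.getD letter 0 + 1)) rest

theorem pvRk_fold (mistakes : List String) (seen : PySem.Dict String Int) (acc : List Int) :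
    (mistakes.foldl
      (fun (st : List Int × PySem.Dict String Int) letter =>
        let s := st.2.insert letter (st.2.getD letter 0 + 1)
        (st.1 ++ [s.getD letter 0], s))
      (acc, seen)).1 = acc ++ pvRanksFrom seen mistakes := by
  induction mistakes generalizing seen acc with
  | nil => simp [pvRanksFrom]
  | cons letter rest ih =>
    simp only [List.foldl_cons, pvRanksFrom]
    rw [ih]
    simp [PySem.Dict.getD_insert]

-- Invariant linking A's shrinking list to B's rank/quota view: the remaining multiset holds
-- max(need - seen, 0) copies of each letter.
theorem pvMain (need : PySem.Dict String Int) (mistakes : List String) :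
    ∀ (ml : List String) (seen : PySem.Dict String Int) (wp wl : List String),
    (∀ s, (ml.count s : Int) = max (need.getD s 0 - seen.getD s 0) 0) →
    (mistakes.foldl
      (fun (st : List String × List String × List String) letter =>
        if letter ∈ st.2.2 then
          (st.1 ++ [letter], st.2.1, (PySem.List.remove? st.2.2 letter).getD st.2.2)
        else
          (st.1, st.2.1 ++ [letter], st.2.2))
      (wp, wl, ml)).1
      = wp ++ ((mistakes.zip (pvRanksFrom seen mistakes)).filter
          (fun p => decide (p.2 ≤ need.getD p.1 0))).map Prod.fst
    ∧ (mistakes.foldl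
      (fun (st : List String × List String × List String) letter =>
        if letter ∈ st.2.2 then
          (st.1 ++ [letter], st.2.1, (PySem.List.remove? st.2.2 letter).getD st.2.2)
        else
          (st.1, st.2.1 ++ [letter], st.2.2))
      (wp, wl, ml)).2.1
      = wl ++ ((mistakes.zip (pvRanksFrom seen mistakes)).filter
          (fun p => decide (p.2 > need.getD p.1 0))).map Prod.fst := by
  induction mistakes with
  | nil => intro ml seen wp wl _; simp [pvRanksFrom]
  | cons letter rest ih =>
    intro ml seen wp wl h
    have hr : pvRanksFrom seen (letter :: rest)
        = (seen.getD letter 0 + 1) :: pvRanksFrom (seen.insert letter (seen.getD letter 0 + 1)) rest := rfl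
    by_cases hm : letter ∈ ml
    · have hcnt : 0 < (ml.count letter : Int) := by
        exact_mod_cast List.count_pos_iff.mpr hm
      have hle : seen.getD letter 0 + 1 ≤ need.getD letter 0 := by
        have := h letter; omega
      have hrem : PySem.List.remove? ml letter = some (ml.erase letter) :=
        PySem.List.remove?_eq_some_erase ml letter hm
      have hinv : ∀ s, ((ml.erase letter).count s : Int)
          = max (need.getD s 0 - (seen.insert letter (seen.getD letter 0 + 1)).getD s 0) 0 := by
        intro s
        rw [PySem.Dict.getD_insert]
        by_cases hs : s = letter
        · subst hs
          rw [if_pos rfl, List.count_erase_self]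
          have := h s
          push_cast; omega
        · rw [if_neg hs, List.count_erase_of_ne hs, h s]
      have := ih (ml.erase letter) (seen.insert letter (seen.getD letter 0 + 1))
        (wp ++ [letter]) wl hinv
      simp only [List.foldl_cons, if_pos hm, hrem, Option.getD_some, hr, List.zip_cons_cons,
        List.filter_cons] at *
      rw [decide_eq_true hle]
      have hgt : ¬ (seen.getD letter 0 + 1 > need.getD letter 0) := by omega
      rw [decide_eq_false hgt]
      simpa [List.append_assoc] using this
    · have hcnt : (ml.count letter : Int) = 0 := by
        exact_mod_cast List.count_eq_zero.mpr hm
      have hgt : seen.getD letter 0 + 1 > need.getD letter 0 := by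
        have := h letter; omega
      have hinv : ∀ s, (ml.count s : Int)
          = max (need.getD s 0 - (seen.insert letter (seen.getD letter 0 + 1)).getD s 0) 0 := by
        intro s
        rw [PySem.Dict.getD_insert]
        by_cases hs : s = letter
        · subst hs; rw [if_pos rfl, hcnt]; have := h s; omega
        · rw [if_neg hs, h s]
      have := ih ml (seen.insert letter (seen.getD letter 0 + 1))
        wp (wl ++ [letter]) hinv
      simp only [List.foldl_cons, if_neg hm, hr, List.zip_cons_cons, List.filter_cons] at *
      rw [decide_eq_true hgt]
      have hle : ¬ (seen.getD letter 0 + 1 ≤ need.getD letter 0) := by omega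
      rw [decide_eq_false hle]
      simpa [List.append_assoc] using this

-- ===== VERDICT (by name: the statement is the Claim_ definition above) =====
theorem proccess_mistakes_spec : Claim_equal_proccess_mistakes := by
  intro mistakes missing_letters _
  unfold Spec_proccess_mistakes proccess_mistakes proccess_mistakes_alt
  dsimp only
  rw [pvRk_fold mistakes PySem.Dict.empty []]
  have h := pvMain
    (missing_letters.foldl (fun (d : PySem.Dict String Int) s => d.insert s (d.getD s 0 + 1)) PySem.Dict.empty)
    mistakes missing_letters PySem.Dict.empty [] []
    (by intro s
        rw [PySem.Dict.getD_foldl_insert_add_one, PySem.Dict.getD_empty]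
        simp)
  exact Prod.ext (by simpa using h.1) (by simpa using h.2)
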